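-- pv_equiv track=rewrite | github.com/shizmob/binja-depanalyzer | msdef.py | quoted_split
-- ===== SOURCE A (Python) =====
-- def quoted_split(haystack, needle=None, maxsplit=-1):
-- 	""" Split `haystack` on `needle`, except inside quote signs """
-- 	start = 0
-- 	search = 0
-- 	parts = []
--
-- 	while maxsplit == -1 or len(parts) < maxsplit:
-- 		if needle:
-- 			p = haystack.find(needle, search)
-- 			if p < 0:
-- 				break
-- 			search = p + len(needle)
-- 		else:
-- 			p = search
-- 			while p < len(haystack) and not haystack[p].isspace():
-- 				p += 1
-- 			if p == len(haystack):
-- 				break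
-- 			search = p
-- 			while search < len(haystack) and haystack[search].isspace():
-- 				search += 1
-- 			if p == search:
-- 				break
--
-- 		if haystack[start:p].count('"') % 2 != 0:
-- 			continue
--
-- 		parts.append(haystack[start:p])
-- 		start = search
--
-- 	parts.append(haystack[start:])
-- 	return parts
-- ===== SOURCE B (Python) =====
-- def quoted_split(haystack, needle=None, maxsplit=-1):
-- 	""" Split `haystack` on `needle`, except inside quote signs """
-- 	# Phase 1: enumerate every candidate split point once, left to right,
-- 	# carrying cumulative '"' counts so phase 2 checks parity in O(1).
-- 	# Each candidate is (p, s, cp, cs): split at p, resume at s,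
-- 	# cp = number of '"' in haystack[:p], cs = number of '"' in haystack[:s].
-- 	cands = []
-- 	if needle:
-- 		c = 0
-- 		prev = 0
-- 		i = haystack.find(needle)
-- 		while i >= 0:
-- 			cp = c + haystack[prev:i].count('"')
-- 			nxt = i + len(needle)
-- 			cs = cp + haystack[i:nxt].count('"')
-- 			cands.append((i, nxt, cp, cs))
-- 			c = cs
-- 			prev = nxt
-- 			i = haystack.find(needle, nxt)
-- 	else:
-- 		c = 0
-- 		i = 0
-- 		n = len(haystack)
-- 		while i < n:
-- 			ch = haystack[i]
-- 			if ch.isspace():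
-- 				j = i
-- 				while j < n and haystack[j].isspace():
-- 					j += 1
-- 				cands.append((i, j, c, c))
-- 				i = j
-- 			else:
-- 				if ch == '"':
-- 					c += 1
-- 				i += 1
--
-- 	# Phase 2: one pass over the candidates, O(1) parity test per candidate.
-- 	parts = []
-- 	start = 0
-- 	startc = 0
-- 	for (p, s, cp, cs) in cands:
-- 		if maxsplit != -1 and len(parts) >= maxsplit:
-- 			break
-- 		if (cp - startc) % 2 == 0:
-- 			parts.append(haystack[start:p])
-- 			start = s
-- 			startc = cs
--
-- 	parts.append(haystack[start:])
-- 	return parts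
-- ===== Notes on version B (the rewrite author's own statement) =====
-- stated objective: faster
-- what changed: A re-scans haystack[start:p] with slice+count for every candidate split point (O(n) per candidate); B first enumerates all candidate split points in one left-to-right pass carrying cumulative quote counts, then selects splits in a second pass with an O(1) count-difference parity test per candidate.
import Mathlib
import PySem

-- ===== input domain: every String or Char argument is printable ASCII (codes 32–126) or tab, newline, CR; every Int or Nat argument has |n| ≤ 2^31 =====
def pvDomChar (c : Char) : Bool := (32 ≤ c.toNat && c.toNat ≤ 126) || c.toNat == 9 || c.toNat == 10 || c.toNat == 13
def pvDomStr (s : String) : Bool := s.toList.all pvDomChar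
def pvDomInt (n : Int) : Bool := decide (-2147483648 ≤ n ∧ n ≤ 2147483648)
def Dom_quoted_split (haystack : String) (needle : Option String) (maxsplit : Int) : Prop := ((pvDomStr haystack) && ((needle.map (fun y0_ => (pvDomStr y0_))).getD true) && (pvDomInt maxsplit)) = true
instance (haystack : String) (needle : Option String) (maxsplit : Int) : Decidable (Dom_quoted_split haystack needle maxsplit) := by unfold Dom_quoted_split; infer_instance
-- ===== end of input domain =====

-- B replaces A's per-candidate slice-and-count parity test (O(n) each) by one left-to-right
-- candidate enumeration carrying cumulative quote counts, then an O(1)-per-candidate selection pass.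

-- ===== PORT A =====

-- 'if needle:' — truthy iff needle is a non-empty string
def qsTruthy : Option String → Bool
  | none => false
  | some s => !(s == "")

-- inner 'while p < len(haystack) and not haystack[p].isspace(): p += 1'
-- (fuel only makes the loop total; haystack[p] is only read under the p < len guard,
--  so the .getD default of the in-range lookup is never used)
def qsScanP (hay : String) : Nat → Int → Int
  | 0, p => p
  | fuel+1, p =>
    if p < PySem.Str.len hay && !(((PySem.Str.pyGet? hay p).map PySem.Chars.isspace).getD true) then
      qsScanP hay fuel (p + 1)
    else p

-- inner 'while search < len(haystack) and haystack[search].isspace(): search += 1'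
def qsScanS (hay : String) : Nat → Int → Int
  | 0, p => p
  | fuel+1, p =>
    if p < PySem.Str.len hay && (((PySem.Str.pyGet? hay p).map PySem.Chars.isspace).getD false) then
      qsScanS hay fuel (p + 1)
    else p

-- A's main while loop; state (start, search, parts); returns the loop-exit (start, parts).
-- fuel = len(haystack)+1 iterations always suffice since search strictly increases.
def qsLoopA (hay : String) (needle : Option String) (maxsplit : Int) :
    Nat → Int → Int → List String → Int × List String
  | 0, start, _, parts => (start, parts)
  | fuel+1, start, search, parts =>
    if maxsplit == -1 || (parts.length : Int) < maxsplit then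
      if qsTruthy needle then
        let nd := needle.getD ""
        let p := PySem.Str.findFrom hay nd search
        if p < 0 then (start, parts)
        else
          let search' := p + PySem.Str.len nd
          if PySem.Int.mod (PySem.Str.count (PySem.Str.slice hay (some start) (some p)) "\"" : Int) 2 != 0 then
            qsLoopA hay needle maxsplit fuel start search' parts
          else
            qsLoopA hay needle maxsplit fuel search' search'
              (parts ++ [PySem.Str.slice hay (some start) (some p)])
      else
        let p := qsScanP hay (hay.toList.length + 1) search
        if p == PySem.Str.len hay then (start, parts)
        else
          let search' := qsScanS hay (hay.toList.length + 1) p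
          if p == search' then (start, parts)
          else
            if PySem.Int.mod (PySem.Str.count (PySem.Str.slice hay (some start) (some p)) "\"" : Int) 2 != 0 then
              qsLoopA hay needle maxsplit fuel start search' parts
            else
              qsLoopA hay needle maxsplit fuel search' search'
                (parts ++ [PySem.Str.slice hay (some start) (some p)])
    else (start, parts)

def quoted_split (haystack : String) (needle : Option String) (maxsplit : Int) : List String :=
  let r := qsLoopA haystack needle maxsplit (haystack.toList.length + 1) 0 0 []
  r.2 ++ [PySem.Str.slice haystack (some r.1) none]

-- ===== PORT B =====

-- 'if needle:' — truthy iff needle is a non-empty string (B's own copy)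
def qsTruthyB : Option String → Bool
  | none => false
  | some s => !(s == "")

-- phase-1 needle mode: 'while i >= 0: …' — candidates (i, nxt, cp, cs) with cumulative counts
def qsCandsN (hay nd : String) : Nat → Int → Int → Int → List (Int × Int × Int × Int)
  | 0, _, _, _ => []
  | fuel+1, prev, c, i =>
    if 0 ≤ i then
      let cp := c + (PySem.Str.count (PySem.Str.slice hay (some prev) (some i)) "\"" : Int)
      let nxt := i + PySem.Str.len nd
      let cs := cp + (PySem.Str.count (PySem.Str.slice hay (some i) (some nxt)) "\"" : Int)
      (i, nxt, cp, cs) :: qsCandsN hay nd fuel nxt cs (PySem.Str.findFrom hay nd nxt)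
    else []

-- phase-1 whitespace-mode inner 'while j < n and haystack[j].isspace(): j += 1'
def qsScanJ (hay : String) : Nat → Int → Int
  | 0, j => j
  | fuel+1, j =>
    if j < PySem.Str.len hay && (((PySem.Str.pyGet? hay j).map PySem.Chars.isspace).getD false) then
      qsScanJ hay fuel (j + 1)
    else j

-- phase-1 whitespace mode: 'while i < n: …' — one char per step, counting quotes on the way
def qsCandsW (hay : String) : Nat → Int → Int → List (Int × Int × Int × Int)
  | 0, _, _ => []
  | fuel+1, i, c =>
    if i < PySem.Str.len hay then
      match PySem.Str.pyGet? hay i with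
      | none => []  -- unreachable: 0 ≤ i < len under the guard
      | some ch =>
        if PySem.Chars.isspace ch then
          let j := qsScanJ hay (hay.toList.length + 1) i
          (i, j, c, c) :: qsCandsW hay fuel j c
        else
          qsCandsW hay fuel (i + 1) (if ch == '"' then c + 1 else c)
    else []

-- phase 2: 'for (p, s, cp, cs) in cands: …' — O(1) parity test per candidate
def qsSel (hay : String) (maxsplit : Int) :
    List (Int × Int × Int × Int) → Int → Int → List String → Int × List String
  | [], start, _, parts => (start, parts)
  | (p, s, cp, cs) :: rest, start, startc, parts =>
    if maxsplit != -1 && maxsplit ≤ (parts.length : Int) then (start, parts)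
    else if PySem.Int.mod (cp - startc) 2 == 0 then
      qsSel hay maxsplit rest s cs (parts ++ [PySem.Str.slice hay (some start) (some p)])
    else
      qsSel hay maxsplit rest start startc parts

def quoted_split_alt (haystack : String) (needle : Option String) (maxsplit : Int) : List String :=
  let cands :=
    if qsTruthyB needle then
      qsCandsN haystack (needle.getD "") (haystack.toList.length + 1) 0 0
        (PySem.Str.find haystack (needle.getD ""))
    else
      qsCandsW haystack (haystack.toList.length + 1) 0 0
  let r := qsSel haystack maxsplit cands 0 0 []
  r.2 ++ [PySem.Str.slice haystack (some r.1) none]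

-- ===== PRECONDITION & SPEC =====
def Spec_quoted_split (haystack : String) (needle : Option String) (maxsplit : Int) (out : List String) : Prop := out = quoted_split_alt haystack needle maxsplit
instance (haystack : String) (needle : Option String) (maxsplit : Int) (out : List String) : Decidable (Spec_quoted_split haystack needle maxsplit out) := by unfold Spec_quoted_split; infer_instance

-- ===== CLAIM (what is proved, stated in full; the proofs are below) =====
def Claim_equal_quoted_split : Prop := ∀ (haystack : String) (needle : Option String) (maxsplit : Int), Dom_quoted_split haystack needle maxsplit → Spec_quoted_split haystack needle maxsplit (quoted_split haystack needle maxsplit)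

-- ===== LEMMAS AND PROOFS =====

-- --- characterisation of Chars.count for the single-char needle '"' ---
theorem qsCountGo (fuel : Nat) : ∀ (l : List Char) (acc : Nat), l.length ≤ fuel →
    PySem.Chars.count.go ['"'] fuel l acc = acc + l.count '"' := by
  induction fuel with
  | zero =>
    intro l acc h
    have : l = [] := List.eq_nil_of_length_eq_zero (Nat.le_zero.mp h)
    subst this; simp [PySem.Chars.count.go]
  | succ n ih =>
    intro l acc h
    cases l with
    | nil => simp [PySem.Chars.count.go]
    | cons a t =>
      simp only [PySem.Chars.count.go]
      by_cases ha : a = '"'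
      · subst ha
        simp only [List.isPrefixOf, beq_self_eq_true, Bool.true_and, if_true]
        rw [show List.drop ['"'].length ('"' :: t) = t from rfl, ih t (acc+1) (by simpa using h)]
        simp; omega
      · have : List.isPrefixOf ['"'] (a :: t) = false := by
          simp [List.isPrefixOf]; exact fun hh => absurd hh.symm ha
        rw [this]
        simp only [Bool.false_eq_true, if_false]
        rw [ih t acc (by simpa using h)]
        simp [ha]

theorem qsStrCountQuote (s : String) : PySem.Str.count s "\"" = s.toList.count '"' := by
  rw [PySem.Str.count_eq]
  show PySem.Chars.count s.toList ['"'] = _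
  rw [PySem.Chars.count]
  simp only [List.isEmpty_cons, if_false, Bool.false_eq_true]
  rw [qsCountGo s.toList.length s.toList 0 le_rfl]
  simp

-- --- cumulative quote counts ---
def qsCnt (cs : List Char) (k : Nat) : Nat := (cs.take k).count '"'

theorem qsCnt_add (cs : List Char) (a b : Nat) (h : a ≤ b) :
    qsCnt cs b = qsCnt cs a + ((cs.drop a).take (b - a)).count '"' := by
  unfold qsCnt
  conv_lhs => rw [show b = a + (b - a) by omega]
  rw [List.take_add, List.count_append]

theorem qsSliceCountI (hay : String) (a b : Nat) (h : a ≤ b) :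
    ((PySem.Str.count (PySem.Str.slice hay (some (a : Int)) (some (b : Int))) "\"" : Nat) : Int)
      = (qsCnt hay.toList b : Int) - (qsCnt hay.toList a : Int) := by
  rw [qsStrCountQuote]
  have h1 : (PySem.Str.slice hay (some (a : Int)) (some (b : Int))).toList
      = (hay.toList.drop a).take (b - a) := by
    rw [PySem.Str.toList_slice, PySem.Chars.slice_eq_listSlice, PySem.List.slice_natCast]
  rw [h1, qsCnt_add hay.toList a b h]
  push_cast; ring

-- --- scan characterisations: first space index / end of space run ---
def qsSp (cs : List Char) (i : Nat) : Nat := i + ((cs.drop i).takeWhile (fun c => !PySem.Chars.isspace c)).length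
def qsEd (cs : List Char) (p : Nat) : Nat := p + ((cs.drop p).takeWhile PySem.Chars.isspace).length

theorem qsAt (hay : String) (k : Nat) (hlt : k < hay.toList.length) (d : Bool) :
    ((PySem.Str.pyGet? hay (k : Int)).map PySem.Chars.isspace).getD d
      = PySem.Chars.isspace hay.toList[k] := by
  simp [List.getElem?_eq_getElem hlt]

theorem qsScanP_eq (hay : String) (fuel : Nat) : ∀ (k : Nat), k ≤ hay.toList.length →
    hay.toList.length + 1 - k ≤ fuel → qsScanP hay fuel (k : Int) = (qsSp hay.toList k : Int) := by
  induction fuel with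
  | zero => intro k hk hf; omega
  | succ n ih =>
    intro k hk hf
    rcases Nat.lt_or_ge k hay.toList.length with hlt | hge
    · have hdrop : hay.toList.drop k = hay.toList[k] :: hay.toList.drop (k+1) :=
        (List.getElem_cons_drop hlt).symm
      by_cases hsp : PySem.Chars.isspace hay.toList[k]
      · have hcond : ((k : Int) < PySem.Str.len hay
            && !(((PySem.Str.pyGet? hay (k : Int)).map PySem.Chars.isspace).getD true)) = false := by
          rw [qsAt hay k hlt]; simp [hsp]
        have hs : qsScanP hay (n+1) (k : Int) = (k : Int) := by
          simp only [qsScanP, hcond, Bool.false_eq_true, if_false]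
        rw [hs]
        have ht : (hay.toList.drop k).takeWhile (fun c => !PySem.Chars.isspace c) = [] := by
          rw [hdrop, List.takeWhile_cons]; simp [hsp]
        simp [qsSp, ht]
      · have hsp' : PySem.Chars.isspace hay.toList[k] = false := by simpa using hsp
        have hcond : ((k : Int) < PySem.Str.len hay
            && !(((PySem.Str.pyGet? hay (k : Int)).map PySem.Chars.isspace).getD true)) = true := by
          rw [qsAt hay k hlt]; simp [hsp', PySem.Str.len_eq]; exact_mod_cast hlt
        have hstep : qsScanP hay (n+1) (k : Int) = qsScanP hay n ((k : Int) + 1) := by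
          simp only [qsScanP, hcond, if_true]
        have hcast : ((k : Int) + 1) = ((k+1 : Nat) : Int) := by push_cast; ring
        rw [hstep, hcast, ih (k+1) (by omega) (by omega)]
        have ht : (hay.toList.drop k).takeWhile (fun c => !PySem.Chars.isspace c)
            = hay.toList[k] :: (hay.toList.drop (k+1)).takeWhile (fun c => !PySem.Chars.isspace c) := by
          rw [hdrop, List.takeWhile_cons]; simp [hsp']
        simp [qsSp, ht]; omega
    · have hk' : k = hay.toList.length := le_antisymm hk hge
      subst hk'
      have hcond : ((hay.toList.length : Int) < PySem.Str.len hay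
          && !(((PySem.Str.pyGet? hay (hay.toList.length : Int)).map PySem.Chars.isspace).getD true)) = false := by
        simp [PySem.Str.len_eq]
      have hs : qsScanP hay (n+1) (hay.toList.length : Int) = (hay.toList.length : Int) := by
        simp only [qsScanP, hcond, Bool.false_eq_true, if_false]
      rw [hs]; simp [qsSp]

theorem qsScanS_eq (hay : String) (fuel : Nat) : ∀ (k : Nat), k ≤ hay.toList.length →
    hay.toList.length + 1 - k ≤ fuel → qsScanS hay fuel (k : Int) = (qsEd hay.toList k : Int) := by
  induction fuel with
  | zero => intro k hk hf; omega
  | succ n ih =>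
    intro k hk hf
    rcases Nat.lt_or_ge k hay.toList.length with hlt | hge
    · have hdrop : hay.toList.drop k = hay.toList[k] :: hay.toList.drop (k+1) :=
        (List.getElem_cons_drop hlt).symm
      by_cases hsp : PySem.Chars.isspace hay.toList[k]
      · have hcond : ((k : Int) < PySem.Str.len hay
            && (((PySem.Str.pyGet? hay (k : Int)).map PySem.Chars.isspace).getD false)) = true := by
          rw [qsAt hay k hlt]; simp [hsp, PySem.Str.len_eq]; exact_mod_cast hlt
        have hstep : qsScanS hay (n+1) (k : Int) = qsScanS hay n ((k : Int) + 1) := by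
          simp only [qsScanS, hcond, if_true]
        have hcast : ((k : Int) + 1) = ((k+1 : Nat) : Int) := by push_cast; ring
        rw [hstep, hcast, ih (k+1) (by omega) (by omega)]
        have ht : (hay.toList.drop k).takeWhile PySem.Chars.isspace
            = hay.toList[k] :: (hay.toList.drop (k+1)).takeWhile PySem.Chars.isspace := by
          rw [hdrop, List.takeWhile_cons]; simp [hsp]
        simp [qsEd, ht]; omega
      · have hsp' : PySem.Chars.isspace hay.toList[k] = false := by simpa using hsp
        have hcond : ((k : Int) < PySem.Str.len hay
            && (((PySem.Str.pyGet? hay (k : Int)).map PySem.Chars.isspace).getD false)) = false := by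
          rw [qsAt hay k hlt]; simp [hsp']
        have hs : qsScanS hay (n+1) (k : Int) = (k : Int) := by
          simp only [qsScanS, hcond, Bool.false_eq_true, if_false]
        rw [hs]
        have ht : (hay.toList.drop k).takeWhile PySem.Chars.isspace = [] := by
          rw [hdrop, List.takeWhile_cons]; simp [hsp']
        simp [qsEd, ht]
    · have hk' : k = hay.toList.length := le_antisymm hk hge
      subst hk'
      have hcond : ((hay.toList.length : Int) < PySem.Str.len hay
          && (((PySem.Str.pyGet? hay (hay.toList.length : Int)).map PySem.Chars.isspace).getD false)) = false := by
        simp [PySem.Str.len_eq]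
      have hs : qsScanS hay (n+1) (hay.toList.length : Int) = (hay.toList.length : Int) := by
        simp only [qsScanS, hcond, Bool.false_eq_true, if_false]
      rw [hs]; simp [qsEd]

-- B's inner space scan is the same loop as A's
theorem qsScanJ_eq_scanS (hay : String) (fuel : Nat) : ∀ (p : Int), qsScanJ hay fuel p = qsScanS hay fuel p := by
  induction fuel with
  | zero => intro p; rfl
  | succ n ih => intro p; simp only [qsScanJ, qsScanS, ih]

-- --- takeWhile facts ---
theorem qsTakeWhileStop (p : Char → Bool) : ∀ (l : List Char) (c : Char),
    l[(l.takeWhile p).length]? = some c → p c = false := by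
  intro l
  induction l with
  | nil => intro c h; simp at h
  | cons a t ih =>
    intro c h
    by_cases hp : p a
    · have htw : (a :: t).takeWhile p = a :: t.takeWhile p := by simp [hp]
      rw [htw] at h
      simp only [List.length_cons, List.getElem?_cons_succ] at h
      exact ih c h
    · have hp' : p a = false := by simpa using hp
      have htw : (a :: t).takeWhile p = [] := by simp [hp']
      rw [htw] at h
      simp only [List.length_nil, List.getElem?_cons_zero, Option.some.injEq] at h
      rw [← h]; exact hp'

theorem qsTakeTakeWhile (p : Char → Bool) : ∀ (l : List Char),
    l.take ((l.takeWhile p).length) = l.takeWhile p := by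
  intro l
  induction l with
  | nil => simp
  | cons a t ih =>
    by_cases hp : p a
    · simp [hp, ih]
    · have hp' : p a = false := by simpa using hp
      simp [hp']

-- --- bounds on qsSp / qsEd ---
theorem qsSp_le (cs : List Char) (i : Nat) (h : i ≤ cs.length) : qsSp cs i ≤ cs.length := by
  have := (List.takeWhile_sublist (p := fun c => !PySem.Chars.isspace c) (l := cs.drop i)).length_le
  simp [List.length_drop] at this
  unfold qsSp; omega

theorem qsEd_le (cs : List Char) (i : Nat) (h : i ≤ cs.length) : qsEd cs i ≤ cs.length := by
  have := (List.takeWhile_sublist (p := PySem.Chars.isspace) (l := cs.drop i)).length_le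
  simp [List.length_drop] at this
  unfold qsEd; omega

theorem qsSp_ge (cs : List Char) (i : Nat) : i ≤ qsSp cs i := by unfold qsSp; omega

theorem qsSp_isspace (cs : List Char) (i : Nat) (h : qsSp cs i < cs.length) :
    PySem.Chars.isspace cs[qsSp cs i] = true := by
  have hlt : (((cs.drop i).takeWhile (fun c => !PySem.Chars.isspace c)).length) < (cs.drop i).length := by
    simp only [List.length_drop]
    unfold qsSp at h; omega
  have hg : (cs.drop i)[((cs.drop i).takeWhile (fun c => !PySem.Chars.isspace c)).length]?
      = some cs[qsSp cs i] := by
    rw [List.getElem?_eq_getElem hlt]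
    congr 1
    rw [List.getElem_drop]
    congr 1
  have := qsTakeWhileStop (fun c => !PySem.Chars.isspace c) (cs.drop i) cs[qsSp cs i] hg
  simpa using this

theorem qsEd_gt (cs : List Char) (i : Nat) (h : i < cs.length) (hsp : PySem.Chars.isspace cs[i] = true) :
    i < qsEd cs i := by
  have hdrop : cs.drop i = cs[i] :: cs.drop (i+1) := (List.getElem_cons_drop h).symm
  unfold qsEd
  rw [hdrop, List.takeWhile_cons, hsp]
  simp

-- --- quote-count facts ---
theorem qsCnt_ed (cs : List Char) (i : Nat) (_h : i ≤ cs.length) : qsCnt cs (qsEd cs i) = qsCnt cs i := by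
  rw [qsCnt_add cs i (qsEd cs i) (by unfold qsEd; omega)]
  have hseg : (cs.drop i).take (qsEd cs i - i) = (cs.drop i).takeWhile PySem.Chars.isspace := by
    unfold qsEd
    rw [show i + ((cs.drop i).takeWhile PySem.Chars.isspace).length - i
        = ((cs.drop i).takeWhile PySem.Chars.isspace).length by omega]
    exact qsTakeTakeWhile _ _
  rw [hseg]
  have : '"' ∉ (cs.drop i).takeWhile PySem.Chars.isspace := by
    intro hmem
    have := List.mem_takeWhile_imp hmem
    exact absurd this (by decide)
  simp [List.count_eq_zero_of_not_mem this]

theorem qsCnt_succ (cs : List Char) (i : Nat) (h : i < cs.length) :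
    qsCnt cs (i+1) = qsCnt cs i + (if cs[i] == '"' then 1 else 0) := by
  rw [qsCnt_add cs i (i+1) (by omega)]
  have : (cs.drop i).take 1 = [cs[i]] := by
    rw [← List.getElem_cons_drop h]; rfl
  simp only [show i + 1 - i = 1 by omega, this]
  by_cases hq : cs[i] = '"' <;> simp [hq]

-- --- the reference run list for whitespace mode ---
def qsRuns (cs : List Char) (i : Nat) (c : Int) : List (Int × Int × Int × Int) :=
  if h : i < cs.length then
    if hsp : PySem.Chars.isspace cs[i] = true then
      ((i : Int), (qsEd cs i : Int), c, c) :: qsRuns cs (qsEd cs i) c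
    else qsRuns cs (i+1) (if cs[i] == '"' then c + 1 else c)
  else []
termination_by cs.length - i
decreasing_by
· have := qsEd_gt cs i h hsp
  omega
· omega

theorem qsSp_here (cs : List Char) (i : Nat) (h : i < cs.length)
    (hsp : PySem.Chars.isspace cs[i] = true) : qsSp cs i = i := by
  unfold qsSp
  rw [← List.getElem_cons_drop h, List.takeWhile_cons, hsp]
  simp

theorem qsSp_stay (cs : List Char) (i : Nat) (h : i < cs.length)
    (hsp : PySem.Chars.isspace cs[i] = false) : qsSp cs i = qsSp cs (i+1) := by
  unfold qsSp
  rw [← List.getElem_cons_drop h, List.takeWhile_cons, hsp]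
  simp
  omega

theorem qsSp_eq_len_of_ge (cs : List Char) (i : Nat) (h : cs.length ≤ i) : qsSp cs i = i := by
  unfold qsSp
  rw [List.drop_eq_nil_of_le h]
  simp

theorem qsRuns_nil_of_ge (cs : List Char) (i : Nat) (c : Int) (h : cs.length ≤ i) :
    qsRuns cs i c = [] := by
  rw [qsRuns]
  simp [show ¬ i < cs.length by omega]

theorem qsCandsW_eq (hay : String) (fuel : Nat) : ∀ (i : Nat) (c : Int), i ≤ hay.toList.length →
    hay.toList.length + 1 - i ≤ fuel → qsCandsW hay fuel (i : Int) c = qsRuns hay.toList i c := by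
  induction fuel with
  | zero => intro i c hi hf; omega
  | succ n ih =>
    intro i c hi hf
    rcases Nat.lt_or_ge i hay.toList.length with hlt | hge
    · have hget : PySem.Str.pyGet? hay (i : Int) = some hay.toList[i] := by
        simp [List.getElem?_eq_getElem hlt]
      have hbound : (i : Int) < PySem.Str.len hay := by
        rw [PySem.Str.len_eq]; exact_mod_cast hlt
      by_cases hsp : PySem.Chars.isspace hay.toList[i] = true
      · have hj : qsScanJ hay (hay.toList.length + 1) (i : Int) = (qsEd hay.toList i : Int) := by
          rw [qsScanJ_eq_scanS]
          exact qsScanS_eq hay (hay.toList.length + 1) i (le_of_lt hlt) (by omega)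
        have hstep : qsCandsW hay (n+1) (i : Int) c
            = ((i : Int), (qsEd hay.toList i : Int), c, c) :: qsCandsW hay n (qsEd hay.toList i : Int) c := by
          simp only [qsCandsW, hget, if_pos hbound, hsp, if_true, hj]
        rw [hstep]
        have hed1 : i < qsEd hay.toList i := qsEd_gt hay.toList i hlt hsp
        have hed2 : qsEd hay.toList i ≤ hay.toList.length := qsEd_le hay.toList i (le_of_lt hlt)
        rw [ih (qsEd hay.toList i) c hed2 (by omega)]
        conv_rhs => rw [qsRuns]
        rw [dif_pos hlt, dif_pos hsp]
      · have hsp' : PySem.Chars.isspace hay.toList[i] = false := by simpa using hsp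
        have hstep : qsCandsW hay (n+1) (i : Int) c
            = qsCandsW hay n ((i : Int) + 1) (if hay.toList[i] == '"' then c + 1 else c) := by
          simp only [qsCandsW, hget, if_pos hbound, hsp', Bool.false_eq_true, if_false]
        rw [hstep, show ((i : Int) + 1) = ((i+1 : Nat) : Int) by push_cast; ring]
        rw [ih (i+1) _ (by omega) (by omega)]
        conv_rhs => rw [qsRuns]
        rw [dif_pos hlt, dif_neg (by simp [hsp'])]
    · have hnb : ¬ ((i : Int) < PySem.Str.len hay) := by
        rw [PySem.Str.len_eq]; exact_mod_cast Nat.not_lt.mpr hge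
      have hstep : qsCandsW hay (n+1) (i : Int) c = [] := by
        simp only [qsCandsW, if_neg hnb]
      rw [hstep, qsRuns_nil_of_ge hay.toList i c hge]

theorem qsRuns_to_sp (cs : List Char) (d : Nat) : ∀ (i : Nat), i ≤ cs.length → cs.length - i ≤ d →
    qsRuns cs i ((qsCnt cs i : Nat) : Int) = qsRuns cs (qsSp cs i) ((qsCnt cs (qsSp cs i) : Nat) : Int) := by
  induction d with
  | zero =>
    intro i hi hd
    have : i = cs.length := by omega
    subst this
    rw [qsSp_eq_len_of_ge cs cs.length le_rfl]
  | succ n ih =>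
    intro i hi hd
    rcases Nat.lt_or_ge i cs.length with hlt | hge
    · by_cases hsp : PySem.Chars.isspace cs[i] = true
      · rw [qsSp_here cs i hlt hsp]
      · have hsp' : PySem.Chars.isspace cs[i] = false := by simpa using hsp
        have hstep : qsRuns cs i ((qsCnt cs i : Nat) : Int)
            = qsRuns cs (i+1) ((qsCnt cs (i+1) : Nat) : Int) := by
          rw [qsRuns]
          simp only [hlt, dif_pos, hsp', Bool.false_eq_true, dif_neg, not_false_iff]
          congr 1
          rw [qsCnt_succ cs i hlt]
          by_cases hq : cs[i] = '"' <;> simp [hq]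
        rw [hstep, ih (i+1) (by omega) (by omega), qsSp_stay cs i hlt hsp']
    · have h1 : qsSp cs i = i := qsSp_eq_len_of_ge cs i hge
      rw [h1]

-- --- the maxsplit conditions of A and B are negations of each other ---
theorem qsMs1 (ms x : Int) (h : (ms == -1 || decide (x < ms)) = false) :
    (ms != -1 && decide (ms ≤ x)) = true := by
  simp [bne] at h ⊢; omega

theorem qsMs2 (ms x : Int) (h : (ms == -1 || decide (x < ms)) = true) :
    (ms != -1 && decide (ms ≤ x)) = false := by
  simp [bne] at h ⊢; omega

-- --- needle mode: A's loop is B's selection pass over B's candidate list ---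
theorem qsSimN (hay nd : String) (ms : Int) (hnd : nd.toList ≠ []) (fuel : Nat) :
    ∀ (st se : Nat) (parts : List String), st ≤ se → se ≤ hay.toList.length →
      hay.toList.length + 1 - se ≤ fuel →
      qsLoopA hay (some nd) ms fuel (st : Int) (se : Int) parts
        = qsSel hay ms (qsCandsN hay nd fuel (se : Int) ((qsCnt hay.toList se : Nat) : Int)
            (PySem.Str.findFrom hay nd (se : Int))) (st : Int) ((qsCnt hay.toList st : Nat) : Int) parts := by
  induction fuel with
  | zero => intro st se parts _ hse hf; omega
  | succ n ih =>
    intro st se parts hst hse hf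
    have hq : qsTruthy (some nd) = true := by
      simp only [qsTruthy, Bool.not_eq_true', beq_eq_false_iff_ne, ne_eq]
      intro hc
      exact hnd (by rw [hc]; rfl)
    by_cases hms : (ms == -1 || decide ((parts.length : Int) < ms)) = true
    · have hFn := PySem.Chars.findFrom_natCast hay.toList nd.toList se hse
      by_cases hr : PySem.Chars.find (hay.toList.drop se) nd.toList = -1
      · have hFstr : PySem.Str.findFrom hay nd (se : Int) = -1 := by
          rw [PySem.Str.findFrom_eq, hFn, if_pos hr]
        have hA : qsLoopA hay (some nd) ms (n+1) (st : Int) (se : Int) parts = ((st : Int), parts) := by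
          simp only [qsLoopA, hms, if_true, hq, Option.getD_some, hFstr]
          norm_num
        have hB : qsCandsN hay nd (n+1) (se : Int) ((qsCnt hay.toList se : Nat) : Int)
            (PySem.Str.findFrom hay nd (se : Int)) = [] := by
          simp only [qsCandsN, hFstr]
          norm_num
        rw [hA, hB]
        rfl
      · have hr0 : 0 ≤ PySem.Chars.find (hay.toList.drop se) nd.toList := by
          have := PySem.Chars.neg_one_le_find (hay.toList.drop se) nd.toList
          omega
        set pN : Nat := se + (PySem.Chars.find (hay.toList.drop se) nd.toList).toNat with hpN
        have hFstr : PySem.Str.findFrom hay nd (se : Int) = (pN : Int) := by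
          rw [PySem.Str.findFrom_eq, hFn, if_neg hr]
          omega
        have hFne : PySem.Chars.findFrom hay.toList nd.toList (se : Int) = ((pN : Nat) : Int) := by
          rw [← PySem.Str.findFrom_eq]; exact hFstr
        have hsep : se ≤ pN := by omega
        have hstp : st ≤ pN := le_trans hst hsep
        obtain ⟨-, hpre, -⟩ := PySem.Chars.findFrom_natCast_spec hay.toList nd.toList se hse
          (by rw [hFne]; intro hc; omega)
        have hdle : nd.toList.length ≤ hay.toList.length - pN := by
          have := hpre.length_le
          rw [hFne] at this
          simpa using this
        have hd1 : 1 ≤ nd.toList.length := by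
          cases hnl : nd.toList with
          | nil => exact absurd hnl hnd
          | cons a t => simp
        have hbound : pN + nd.toList.length ≤ hay.toList.length := by omega
        have hlen : PySem.Str.len nd = (nd.toList.length : Int) := PySem.Str.len_eq nd
        -- the common parity quantity
        have hcA : ((PySem.Str.count (PySem.Str.slice hay (some (st : Int)) (some (pN : Int))) "\"" : Nat) : Int)
            = ((qsCnt hay.toList pN : Nat) : Int) - ((qsCnt hay.toList st : Nat) : Int) :=
          qsSliceCountI hay st pN hstp
        have hcp : ((qsCnt hay.toList se : Nat) : Int)
              + ((PySem.Str.count (PySem.Str.slice hay (some (se : Int)) (some (pN : Int))) "\"" : Nat) : Int)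
            = ((qsCnt hay.toList pN : Nat) : Int) := by
          rw [qsSliceCountI hay se pN hsep]; ring
        have hnxt : (pN : Int) + PySem.Str.len nd = ((pN + nd.toList.length : Nat) : Int) := by
          rw [hlen]; push_cast; ring
        have hcs : ((qsCnt hay.toList pN : Nat) : Int)
              + ((PySem.Str.count (PySem.Str.slice hay (some (pN : Int))
                  (some ((pN + nd.toList.length : Nat) : Int))) "\"" : Nat) : Int)
            = ((qsCnt hay.toList (pN + nd.toList.length) : Nat) : Int) := by
          rw [qsSliceCountI hay pN (pN + nd.toList.length) (by omega)]; ring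
        -- unfold one A step
        have hA : qsLoopA hay (some nd) ms (n+1) (st : Int) (se : Int) parts
            = if PySem.Int.mod (((qsCnt hay.toList pN : Nat) : Int) - ((qsCnt hay.toList st : Nat) : Int)) 2 != 0 then
                qsLoopA hay (some nd) ms n (st : Int) ((pN + nd.toList.length : Nat) : Int) parts
              else
                qsLoopA hay (some nd) ms n ((pN + nd.toList.length : Nat) : Int) ((pN + nd.toList.length : Nat) : Int)
                  (parts ++ [PySem.Str.slice hay (some (st : Int)) (some (pN : Int))]) := by
          simp only [qsLoopA, hms, if_true, hq, Option.getD_some, hFstr, hnxt, hcA]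
          norm_num
        -- unfold one B step
        have hB : qsCandsN hay nd (n+1) (se : Int) ((qsCnt hay.toList se : Nat) : Int)
              (PySem.Str.findFrom hay nd (se : Int))
            = ((pN : Int), ((pN + nd.toList.length : Nat) : Int), ((qsCnt hay.toList pN : Nat) : Int),
                ((qsCnt hay.toList (pN + nd.toList.length) : Nat) : Int))
              :: qsCandsN hay nd n ((pN + nd.toList.length : Nat) : Int)
                  ((qsCnt hay.toList (pN + nd.toList.length) : Nat) : Int)
                  (PySem.Str.findFrom hay nd ((pN + nd.toList.length : Nat) : Int)) := by
          simp only [qsCandsN, hFstr, hnxt, hcp, hcs]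
          norm_num
        rw [hA, hB]
        have hbreak : (ms != -1 && decide (ms ≤ (parts.length : Int))) = false := qsMs2 ms _ hms
        by_cases hpar : (PySem.Int.mod (((qsCnt hay.toList pN : Nat) : Int) - ((qsCnt hay.toList st : Nat) : Int)) 2 == 0) = true
        · -- split accepted
          have hparA : (PySem.Int.mod (((qsCnt hay.toList pN : Nat) : Int) - ((qsCnt hay.toList st : Nat) : Int)) 2 != 0) = false := by
            simp only [bne, hpar, Bool.not_true]
          rw [hparA]
          simp only [Bool.false_eq_true, if_false, qsSel, hbreak, hpar, if_true]
          exact ih (pN + nd.toList.length) (pN + nd.toList.length) _ le_rfl hbound (by omega)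
        · -- split skipped
          have hpar' : (PySem.Int.mod (((qsCnt hay.toList pN : Nat) : Int) - ((qsCnt hay.toList st : Nat) : Int)) 2 == 0) = false := by
            simpa using hpar
          have hparA : (PySem.Int.mod (((qsCnt hay.toList pN : Nat) : Int) - ((qsCnt hay.toList st : Nat) : Int)) 2 != 0) = true := by
            simp only [bne, hpar', Bool.not_false]
          rw [hparA]
          simp only [if_true, qsSel, hbreak, hpar', Bool.false_eq_true, if_false]
          exact ih st (pN + nd.toList.length) parts (by omega) hbound (by omega)
    · have hms' : (ms == -1 || decide ((parts.length : Int) < ms)) = false := by simpa using hms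
      have hA : qsLoopA hay (some nd) ms (n+1) (st : Int) (se : Int) parts = ((st : Int), parts) := by
        simp only [qsLoopA, hms', Bool.false_eq_true, if_false]
      rw [hA]
      cases hc : qsCandsN hay nd (n+1) (se : Int) ((qsCnt hay.toList se : Nat) : Int)
          (PySem.Str.findFrom hay nd (se : Int)) with
      | nil => rfl
      | cons hd tl =>
        obtain ⟨p, s, cp, cq⟩ := hd
        simp only [qsSel, qsMs1 ms _ hms', if_true]

-- --- whitespace mode: A's loop is B's selection pass over the runs of whitespace ---
theorem qsSimW (hay : String) (needle : Option String) (ms : Int) (hne : qsTruthy needle = false) (fuel : Nat) :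
    ∀ (st se : Nat) (parts : List String), st ≤ se → se ≤ hay.toList.length →
      hay.toList.length + 1 - se ≤ fuel →
      qsLoopA hay needle ms fuel (st : Int) (se : Int) parts
        = qsSel hay ms (qsRuns hay.toList se ((qsCnt hay.toList se : Nat) : Int))
            (st : Int) ((qsCnt hay.toList st : Nat) : Int) parts := by
  induction fuel with
  | zero => intro st se parts _ hse hf; omega
  | succ n ih =>
    intro st se parts hst hse hf
    by_cases hms : (ms == -1 || decide ((parts.length : Int) < ms)) = true
    · have hp : qsScanP hay (hay.toList.length + 1) (se : Int) = (qsSp hay.toList se : Int) :=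
        qsScanP_eq hay (hay.toList.length + 1) se hse (by omega)
      have hsple : qsSp hay.toList se ≤ hay.toList.length := qsSp_le hay.toList se hse
      have hspge : se ≤ qsSp hay.toList se := qsSp_ge hay.toList se
      rw [qsRuns_to_sp hay.toList hay.toList.length se hse (by omega)]
      rcases Nat.lt_or_ge (qsSp hay.toList se) (hay.toList.length) with hsp | hsp
      · -- a whitespace run exists: candidate at qsSp
        have hspc : PySem.Chars.isspace hay.toList[qsSp hay.toList se] = true :=
          qsSp_isspace hay.toList se hsp
        have hedgt : qsSp hay.toList se < qsEd hay.toList (qsSp hay.toList se) :=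
          qsEd_gt hay.toList _ hsp hspc
        have hedle : qsEd hay.toList (qsSp hay.toList se) ≤ hay.toList.length :=
          qsEd_le hay.toList _ (le_of_lt hsp)
        have hs : qsScanS hay (hay.toList.length + 1) ((qsSp hay.toList se : Nat) : Int)
            = ((qsEd hay.toList (qsSp hay.toList se) : Nat) : Int) :=
          qsScanS_eq hay (hay.toList.length + 1) _ (le_of_lt hsp) (by omega)
        have hne1 : (((qsSp hay.toList se : Nat) : Int) == (PySem.Str.len hay)) = false := by
          rw [PySem.Str.len_eq]
          simp only [beq_eq_false_iff_ne, ne_eq, Int.natCast_inj]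
          omega
        have hne2 : (((qsSp hay.toList se : Nat) : Int) == ((qsEd hay.toList (qsSp hay.toList se) : Nat) : Int)) = false := by
          simp only [beq_eq_false_iff_ne, ne_eq]
          intro hcc
          have : qsSp hay.toList se = qsEd hay.toList (qsSp hay.toList se) := by exact_mod_cast hcc
          omega
        have hcA : ((PySem.Str.count (PySem.Str.slice hay (some (st : Int)) (some ((qsSp hay.toList se : Nat) : Int))) "\"" : Nat) : Int)
            = ((qsCnt hay.toList (qsSp hay.toList se) : Nat) : Int) - ((qsCnt hay.toList st : Nat) : Int) :=
          qsSliceCountI hay st _ (le_trans hst (qsSp_ge hay.toList se))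
        have hA : qsLoopA hay needle ms (n+1) (st : Int) (se : Int) parts
            = if PySem.Int.mod (((qsCnt hay.toList (qsSp hay.toList se) : Nat) : Int) - ((qsCnt hay.toList st : Nat) : Int)) 2 != 0 then
                qsLoopA hay needle ms n (st : Int) ((qsEd hay.toList (qsSp hay.toList se) : Nat) : Int) parts
              else
                qsLoopA hay needle ms n ((qsEd hay.toList (qsSp hay.toList se) : Nat) : Int)
                  ((qsEd hay.toList (qsSp hay.toList se) : Nat) : Int)
                  (parts ++ [PySem.Str.slice hay (some (st : Int)) (some ((qsSp hay.toList se : Nat) : Int))]) := by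
          simp only [qsLoopA, hms, if_true, hne, Bool.false_eq_true, if_false, hp, hs, hne1, hne2, hcA]
        have hruns : qsRuns hay.toList (qsSp hay.toList se) ((qsCnt hay.toList (qsSp hay.toList se) : Nat) : Int)
            = (((qsSp hay.toList se : Nat) : Int), ((qsEd hay.toList (qsSp hay.toList se) : Nat) : Int),
                ((qsCnt hay.toList (qsSp hay.toList se) : Nat) : Int), ((qsCnt hay.toList (qsSp hay.toList se) : Nat) : Int))
              :: qsRuns hay.toList (qsEd hay.toList (qsSp hay.toList se)) ((qsCnt hay.toList (qsSp hay.toList se) : Nat) : Int) := by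
          conv_lhs => rw [qsRuns]
          rw [dif_pos hsp, dif_pos hspc]
        rw [hA, hruns]
        have hbreak : (ms != -1 && decide (ms ≤ (parts.length : Int))) = false := qsMs2 ms _ hms
        have hcntq : qsCnt hay.toList (qsEd hay.toList (qsSp hay.toList se)) = qsCnt hay.toList (qsSp hay.toList se) :=
          qsCnt_ed hay.toList _ (le_of_lt hsp)
        by_cases hpar : (PySem.Int.mod (((qsCnt hay.toList (qsSp hay.toList se) : Nat) : Int) - ((qsCnt hay.toList st : Nat) : Int)) 2 == 0) = true
        · have hparA : (PySem.Int.mod (((qsCnt hay.toList (qsSp hay.toList se) : Nat) : Int) - ((qsCnt hay.toList st : Nat) : Int)) 2 != 0) = false := by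
            simp only [bne, hpar, Bool.not_true]
          rw [hparA]
          simp only [Bool.false_eq_true, if_false, qsSel, hbreak, hpar, if_true]
          have := ih (qsEd hay.toList (qsSp hay.toList se)) (qsEd hay.toList (qsSp hay.toList se))
            (parts ++ [PySem.Str.slice hay (some (st : Int)) (some ((qsSp hay.toList se : Nat) : Int))])
            le_rfl hedle (by omega)
          rw [this, hcntq]
        · have hpar' : (PySem.Int.mod (((qsCnt hay.toList (qsSp hay.toList se) : Nat) : Int) - ((qsCnt hay.toList st : Nat) : Int)) 2 == 0) = false := by
            simpa using hpar
          have hparA : (PySem.Int.mod (((qsCnt hay.toList (qsSp hay.toList se) : Nat) : Int) - ((qsCnt hay.toList st : Nat) : Int)) 2 != 0) = true := by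
            simp only [bne, hpar', Bool.not_false]
          rw [hparA]
          simp only [if_true, qsSel, hbreak, hpar', Bool.false_eq_true, if_false]
          have := ih st (qsEd hay.toList (qsSp hay.toList se)) parts
            (by omega) hedle (by omega)
          rw [this, hcntq]
      · -- no whitespace left: break
        have hspeq : qsSp hay.toList se = hay.toList.length := by omega
        have heq1 : (((qsSp hay.toList se : Nat) : Int) == (PySem.Str.len hay)) = true := by
          rw [PySem.Str.len_eq, hspeq]
          simp
        have hA : qsLoopA hay needle ms (n+1) (st : Int) (se : Int) parts = ((st : Int), parts) := by
          simp only [qsLoopA, hms, if_true, hne, Bool.false_eq_true, if_false, hp, heq1]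
        rw [hA, hspeq, qsRuns_nil_of_ge hay.toList _ _ le_rfl]
        rfl
    · have hms' : (ms == -1 || decide ((parts.length : Int) < ms)) = false := by simpa using hms
      have hA : qsLoopA hay needle ms (n+1) (st : Int) (se : Int) parts = ((st : Int), parts) := by
        simp only [qsLoopA, hms', Bool.false_eq_true, if_false]
      rw [hA, qsRuns_to_sp hay.toList hay.toList.length se hse (by omega)]
      cases hc : qsRuns hay.toList (qsSp hay.toList se) ((qsCnt hay.toList (qsSp hay.toList se) : Nat) : Int) with
      | nil => rfl
      | cons hd tl =>
        obtain ⟨p, s, cp, cq⟩ := hd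
        simp only [qsSel, qsMs1 ms _ hms', if_true]

-- --- top level ---
theorem qsCnt_zero (cs : List Char) : ((qsCnt cs 0 : Nat) : Int) = (((0 : Nat)) : Int) := rfl

theorem quoted_split_eq_alt (hay : String) (needle : Option String) (ms : Int) :
    quoted_split hay needle ms = quoted_split_alt hay needle ms := by
  cases needle with
  | none =>
    simp only [quoted_split, quoted_split_alt,
      show qsTruthyB none = false from rfl, Bool.false_eq_true, if_false]
    rw [show (0 : Int) = ((0 : Nat) : Int) from rfl]
    rw [qsCandsW_eq hay (hay.toList.length+1) 0 (((0 : Nat)) : Int) (Nat.zero_le _) (by omega)]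
    rw [qsSimW hay none ms rfl (hay.toList.length+1) 0 0 [] le_rfl (Nat.zero_le _) (by omega)]
    rw [qsCnt_zero]
  | some nd =>
    by_cases hnd : nd.toList = []
    · have hemp : nd = "" := by
        have := congrArg String.ofList hnd
        simpa using this
      have hq : qsTruthy (some nd) = false := by rw [hemp]; rfl
      have hqB : qsTruthyB (some nd) = false := by rw [hemp]; rfl
      simp only [quoted_split, quoted_split_alt, hqB, Bool.false_eq_true, if_false]
      rw [show (0 : Int) = ((0 : Nat) : Int) from rfl]
      rw [qsCandsW_eq hay (hay.toList.length+1) 0 (((0 : Nat)) : Int) (Nat.zero_le _) (by omega)]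
      rw [qsSimW hay (some nd) ms hq (hay.toList.length+1) 0 0 [] le_rfl (Nat.zero_le _) (by omega)]
      rw [qsCnt_zero]
    · have hq : qsTruthy (some nd) = true := by
        simp only [qsTruthy, Bool.not_eq_true', beq_eq_false_iff_ne, ne_eq]
        intro hc
        exact hnd (by rw [hc]; rfl)
      have hstart : PySem.Str.findFrom hay nd ((0 : Nat) : Int) = PySem.Str.find hay nd := by
        rw [PySem.Str.findFrom_eq, show ((0 : Nat) : Int) = 0 from rfl,
          PySem.Chars.findFrom_zero, PySem.Str.find_eq]
      have hqB : qsTruthyB (some nd) = true := by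
        simp only [qsTruthyB, Bool.not_eq_true', beq_eq_false_iff_ne, ne_eq]
        intro hc
        exact hnd (by rw [hc]; rfl)
      simp only [quoted_split, quoted_split_alt, hqB, if_true, Option.getD_some]
      rw [show (0 : Int) = ((0 : Nat) : Int) from rfl]
      rw [qsSimN hay nd ms hnd (hay.toList.length+1) 0 0 [] le_rfl (Nat.zero_le _) (by omega)]
      rw [hstart, qsCnt_zero]

-- ===== VERDICT (by name: the statement is the Claim_ definition above) =====
theorem quoted_split_spec : Claim_equal_quoted_split := by
  intro hay needle ms _
  exact quoted_split_eq_alt hay needle ms
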